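-- pv_equiv track=rewrite | github.com/AndrewLitteken/csv-markdown-conversion | csv-to-markdown.py | parse_and_format
-- ===== SOURCE A (Python) =====
-- def format_item(formats, item, col, row):
-- 	if (col, row) in formats:
-- 		style = formats[(col, row)]
-- 		for style_type in style:
-- 			if style_type == 'bold':
-- 				item = '**' + item + '**'
-- 			if style_type == 'italics':
-- 				item = '_' + item + '_'
-- 			if style_type == 'code':
-- 				item = '`' + item + '`'
-- 	return item
--
-- def parse_and_format(data, formats, formatting):
-- 	maximum = []
-- 	rows = []
-- 	# Parse information
-- 	for row_index, row in enumerate(data):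
-- 		items = []
--
-- 		for col_index, item in enumerate(row):
-- 			if len(maximum) >= col_index + 1: # if length of max array large enough
-- 				if maximum[col_index] < len(item): # check and replace max if needed
-- 					maximum[col_index] = len(item)
-- 			else:
-- 				maximum.append(len(item)) # add new entry if not large enough
--
-- 			if formatting:
-- 				item = format_item(formats, item, col_index, row_index)
-- 				if len(item) > maximum[col_index]:
-- 					maximum[col_index] = len(item)
--
-- 			items.append(item) # append data to item array
--
-- 		rows.append(items) # add row of info to rows array
--
-- 	return rows, maximum
-- ===== SOURCE B (Python) =====
-- def format_item(formats, item, col, row):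
-- 	if (col, row) in formats:
-- 		style = formats[(col, row)]
-- 		for style_type in style:
-- 			if style_type == 'bold':
-- 				item = '**' + item + '**'
-- 			if style_type == 'italics':
-- 				item = '_' + item + '_'
-- 			if style_type == 'code':
-- 				item = '`' + item + '`'
-- 	return item
--
-- def parse_and_format(data, formats, formatting):
-- 	# Phase 1: build the formatted rows.
-- 	rows = [[format_item(formats, item, c, r) if formatting else item
-- 	         for c, item in enumerate(row)]
-- 	        for r, row in enumerate(data)]
-- 	# Phase 2: per-column maxima of the formatted cells, growing the list
-- 	# as wider rows introduce new columns.
-- 	maximum = []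
-- 	for row in rows:
-- 		for c, item in enumerate(row):
-- 			if c < len(maximum):
-- 				if len(item) > maximum[c]:
-- 					maximum[c] = len(item)
-- 			else:
-- 				maximum.append(len(item))
-- 	return rows, maximum
-- ===== Notes on version B (the rewrite author's own statement) =====
-- stated objective: simpler
-- what changed: A interleaves the column-maximum bookkeeping (pre-format length check, then a post-format re-check against the same slot) inside the cell loop; B first builds the formatted rows with a comprehension and then computes the per-column maxima of the already-formatted cells in a separate pass, dropping the pre/post-format double check.
import Mathlib
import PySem

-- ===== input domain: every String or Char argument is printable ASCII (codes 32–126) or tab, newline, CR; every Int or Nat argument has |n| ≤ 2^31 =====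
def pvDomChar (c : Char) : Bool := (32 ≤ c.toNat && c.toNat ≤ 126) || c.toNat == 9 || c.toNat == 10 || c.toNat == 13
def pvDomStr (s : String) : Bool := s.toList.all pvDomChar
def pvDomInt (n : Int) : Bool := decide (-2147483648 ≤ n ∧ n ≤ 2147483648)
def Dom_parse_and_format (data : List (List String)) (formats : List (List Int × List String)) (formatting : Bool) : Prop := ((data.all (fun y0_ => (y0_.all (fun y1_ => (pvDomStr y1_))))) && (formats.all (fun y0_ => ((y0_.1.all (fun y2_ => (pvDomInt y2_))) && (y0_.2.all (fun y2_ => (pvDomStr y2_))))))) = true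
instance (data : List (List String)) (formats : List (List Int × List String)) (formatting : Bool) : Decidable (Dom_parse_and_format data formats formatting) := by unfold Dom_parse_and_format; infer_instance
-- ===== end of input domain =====

-- B replaces A's interleaved maximum bookkeeping by two phases: build the formatted
-- rows first, then compute the per-column maxima of the formatted cells (simpler).

-- ===== PORT A =====

-- Python '+' on str (exact: concatenation of code points)
def pyCat (a b : String) : String := String.ofList (a.toList ++ b.toList)

-- the body of format_item's 'for style_type in style' loop
def styleStep (item style_type : String) : String :=
  let item := if style_type == "bold" then pyCat (pyCat "**" item) "**" else item
  let item := if style_type == "italics" then pyCat (pyCat "_" item) "_" else item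
  if style_type == "code" then pyCat (pyCat "`" item) "`" else item

-- format_item from the module; the dict key (col, row) is the List Int [col, row]
def format_item (formats : List (List Int × List String)) (item : String) (col : Int) (row : Int) : String :=
  match List.lookup [col, row] formats with   -- 'if (col, row) in formats: style = formats[(col, row)]' (first match)
  | none => item
  | some style => List.foldl styleStep item style

-- one iteration of A's inner loop body, acting on `maximum` and producing the appended item;
-- the enumerate counter ci is a nonnegative Python int, carried as a Nat (cast for the dict key);
-- maximum[col_index] is read with getD / written with set: the guards keep the index in range
def aCell (formats : List (List Int × List String)) (formatting : Bool) (ri : Int) (ci : Nat)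
    (maximum : List Int) (item : String) : List Int × String :=
  let m1 :=
    if maximum.length ≥ ci + 1 then                                       -- 'if len(maximum) >= col_index + 1'
      if maximum.getD ci 0 < PySem.Str.len item then maximum.set ci (PySem.Str.len item) else maximum
    else maximum ++ [PySem.Str.len item]                                  -- 'maximum.append(len(item))'
  if formatting then
    let item := format_item formats item (ci : Int) ri
    let m2 := if PySem.Str.len item > m1.getD ci 0 then m1.set ci (PySem.Str.len item) else m1
    (m2, item)
  else (m1, item)

def pafA_inner (formats : List (List Int × List String)) (formatting : Bool) (ri : Int) :
    Nat → List Int → List String → List String → List Int × List String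
  | _, maximum, items, [] => (maximum, items)
  | ci, maximum, items, item :: rest =>
      let p := aCell formats formatting ri ci maximum item
      pafA_inner formats formatting ri (ci + 1) p.1 (items ++ [p.2]) rest

def pafA_outer (formats : List (List Int × List String)) (formatting : Bool) :
    Int → List Int → List (List String) → List (List String) → List Int × List (List String)
  | _, maximum, rows, [] => (maximum, rows)
  | ri, maximum, rows, row :: rest =>
      let p := pafA_inner formats formatting ri 0 maximum [] row
      pafA_outer formats formatting (ri + 1) p.1 (rows ++ [p.2]) rest

def parse_and_format (data : List (List String)) (formats : List (List Int × List String)) (formatting : Bool) : List (List String) × List Int :=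
  let p := pafA_outer formats formatting 0 [] [] data
  (p.2, p.1)

-- ===== PORT B =====

-- phase-2 inner if/else of Source B: update or grow `maximum` with one cell's length
def bStep (ci : Nat) (maximum : List Int) (L : Int) : List Int :=
  if ci < maximum.length then
    if L > maximum.getD ci 0 then maximum.set ci L else maximum
  else maximum ++ [L]

-- one row of Source B's phase-1 comprehension
def pafB_row (formats : List (List Int × List String)) (formatting : Bool) (ri : Int) (row : List String) : List String :=
  (PySem.List.enumerate row).map (fun p => if formatting then format_item formats p.2 p.1 ri else p.2)

-- phase-2 inner loop over one formatted row (column counter as a Nat)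
def pafB_upd : Nat → List Int → List String → List Int
  | _, maximum, [] => maximum
  | ci, maximum, item :: rest => pafB_upd (ci + 1) (bStep ci maximum (PySem.Str.len item)) rest

def parse_and_format_alt (data : List (List String)) (formats : List (List Int × List String)) (formatting : Bool) : List (List String) × List Int :=
  let rows := (PySem.List.enumerate data).map (fun p => pafB_row formats formatting p.1 p.2)
  (rows, rows.foldl (fun m r => pafB_upd 0 m r) [])

-- ===== PRECONDITION & SPEC =====
def Spec_parse_and_format (data : List (List String)) (formats : List (List Int × List String)) (formatting : Bool) (out : List (List String) × List Int) : Prop := out = parse_and_format_alt data formats formatting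
instance (data : List (List String)) (formats : List (List Int × List String)) (formatting : Bool) (out : List (List String) × List Int) : Decidable (Spec_parse_and_format data formats formatting out) := by unfold Spec_parse_and_format; infer_instance

-- ===== CLAIM (what is proved, stated in full; the proofs are below) =====
def Claim_equal_parse_and_format : Prop := ∀ (data : List (List String)) (formats : List (List Int × List String)) (formatting : Bool), Dom_parse_and_format data formats formatting → Spec_parse_and_format data formats formatting (parse_and_format data formats formatting)

-- ===== LEMMAS AND PROOFS =====

-- the cell value appended by both programs at column ci
def cellOut (formats : List (List Int × List String)) (formatting : Bool) (ri : Int) (ci : Nat) (item : String) : String :=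
  if formatting then format_item formats item (ci : Int) ri else item

-- the formatted row as a structural recursion, column counter explicit
def fmtFrom (formats : List (List Int × List String)) (formatting : Bool) (ri : Int) : Nat → List String → List String
  | _, [] => []
  | ci, x :: xs => cellOut formats formatting ri ci x :: fmtFrom formats formatting ri (ci + 1) xs

-- the formatted rows, row counter explicit
def rowsFrom (formats : List (List Int × List String)) (formatting : Bool) : Int → List (List String) → List (List String)
  | _, [] => []
  | ri, row :: rest => fmtFrom formats formatting ri 0 row :: rowsFrom formats formatting (ri + 1) rest

theorem len_pyCat (a b : String) : PySem.Str.len (pyCat a b) = PySem.Str.len a + PySem.Str.len b := by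
  simp [pyCat, PySem.Str.len]

theorem len_star : PySem.Str.len "**" = 2 := by simp [PySem.Str.len]
theorem len_und : PySem.Str.len "_" = 1 := by simp [PySem.Str.len]
theorem len_tick : PySem.Str.len "`" = 1 := by simp [PySem.Str.len]

theorem len_step_ge (item st : String) : PySem.Str.len item ≤ PySem.Str.len (styleStep item st) := by
  unfold styleStep
  split_ifs <;> simp only [len_pyCat, len_star, len_und, len_tick] <;> omega

theorem len_foldl_ge (style : List String) : ∀ item : String,
    PySem.Str.len item ≤ PySem.Str.len (List.foldl styleStep item style) := by
  induction style with
  | nil => intro item; simp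
  | cons st rest ih => intro item; exact le_trans (len_step_ge item st) (ih _)

theorem len_format_ge (formats : List (List Int × List String)) (item : String) (c r : Int) :
    PySem.Str.len item ≤ PySem.Str.len (format_item formats item c r) := by
  unfold format_item
  cases List.lookup [c, r] formats with
  | none => exact le_refl _
  | some style => exact len_foldl_ge style item

theorem getD_set_self (m : List Int) (ci : Nat) (a : Int) (h : ci < m.length) :
    (m.set ci a).getD ci 0 = a := by
  simp [List.getD, h]

theorem getD_append_len (m : List Int) (a : Int) : (m ++ [a]).getD m.length 0 = a := by
  simp [List.getD]

theorem set_append_len (m : List Int) (a b : Int) : (m ++ [a]).set m.length b = m ++ [b] := by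
  simp

theorem bStep_length (ci : Nat) (m : List Int) (L : Int) (h : ci ≤ m.length) :
    ci + 1 ≤ (bStep ci m L).length := by
  unfold bStep; split_ifs with h1 <;> simp <;> omega

theorem aCell_snd (formats : List (List Int × List String)) (fm : Bool) (ri : Int) (ci : Nat)
    (m : List Int) (item : String) :
    (aCell formats fm ri ci m item).2 = cellOut formats fm ri ci item := by
  cases fm <;> simp [aCell, cellOut]

theorem two_step (m : List Int) (ci : Nat) (L0 LF : Int) (hle : L0 ≤ LF) (h : ci ≤ m.length) :
    (if LF > (if m.length ≥ ci + 1 then (if m.getD ci 0 < L0 then m.set ci L0 else m) else m ++ [L0]).getD ci 0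
     then (if m.length ≥ ci + 1 then (if m.getD ci 0 < L0 then m.set ci L0 else m) else m ++ [L0]).set ci LF
     else (if m.length ≥ ci + 1 then (if m.getD ci 0 < L0 then m.set ci L0 else m) else m ++ [L0]))
    = bStep ci m LF := by
  rcases Nat.lt_or_ge ci m.length with hlt | hge'
  · have hc : m.length ≥ ci + 1 := hlt
    rw [if_pos hc]
    unfold bStep
    rw [if_pos hlt]
    by_cases h1 : m.getD ci 0 < L0
    · rw [if_pos h1, getD_set_self m ci L0 hlt]
      have h5 : LF > m.getD ci 0 := lt_of_lt_of_le h1 hle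
      rw [if_pos h5]
      by_cases h3 : LF > L0
      · rw [if_pos h3, List.set_set]
      · have hL : L0 = LF := le_antisymm hle (not_lt.1 h3)
        rw [if_neg h3, hL]
    · rw [if_neg h1]
  · have hci : ci = m.length := le_antisymm h hge'
    have hc : ¬ m.length ≥ ci + 1 := by omega
    have hlt : ¬ ci < m.length := by omega
    rw [if_neg hc]
    unfold bStep
    rw [if_neg hlt]
    subst hci
    rw [getD_append_len]
    by_cases h3 : LF > L0
    · rw [if_pos h3, set_append_len]
    · have hL : L0 = LF := le_antisymm hle (not_lt.1 h3)
      rw [if_neg h3, hL]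

theorem aCell_fst (formats : List (List Int × List String)) (fm : Bool) (ri : Int) (ci : Nat)
    (m : List Int) (item : String) (h : ci ≤ m.length) :
    (aCell formats fm ri ci m item).1 = bStep ci m (PySem.Str.len (cellOut formats fm ri ci item)) := by
  cases fm with
  | false => rfl
  | true =>
    exact two_step m ci (PySem.Str.len item)
      (PySem.Str.len (format_item formats item (ci : Int) ri))
      (len_format_ge formats item (ci : Int) ri) h

theorem inner_eq (formats : List (List Int × List String)) (fm : Bool) (ri : Int) :
    ∀ (row : List String) (ci : Nat) (m : List Int) (items : List String), ci ≤ m.length →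
    pafA_inner formats fm ri ci m items row =
      (pafB_upd ci m (fmtFrom formats fm ri ci row), items ++ fmtFrom formats fm ri ci row) := by
  intro row
  induction row with
  | nil => intro ci m items _; simp [pafA_inner, fmtFrom, pafB_upd]
  | cons item rest ih =>
    intro ci m items h
    rw [pafA_inner]
    rw [aCell_fst formats fm ri ci m item h, aCell_snd formats fm ri ci m item]
    rw [ih (ci + 1) _ _ (bStep_length ci m _ h)]
    simp [fmtFrom, pafB_upd]

theorem outer_eq (formats : List (List Int × List String)) (fm : Bool) :
    ∀ (data : List (List String)) (ri : Int) (m : List Int) (rows : List (List String)),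
    pafA_outer formats fm ri m rows data =
      ((rowsFrom formats fm ri data).foldl (fun m r => pafB_upd 0 m r) m,
        rows ++ rowsFrom formats fm ri data) := by
  intro data
  induction data with
  | nil => intro ri m rows; simp [pafA_outer, rowsFrom]
  | cons row rest ih =>
    intro ri m rows
    rw [pafA_outer]
    rw [inner_eq formats fm ri row 0 m [] (Nat.zero_le _)]
    rw [ih (ri + 1)]
    simp [rowsFrom]

theorem fmtFrom_eq_enum (formats : List (List Int × List String)) (fm : Bool) (ri : Int) :
    ∀ (row : List String) (s : Nat),
    (PySem.List.enumerate row (s : Int)).map (fun p => if fm then format_item formats p.2 p.1 ri else p.2) =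
      fmtFrom formats fm ri s row := by
  intro row
  induction row with
  | nil => intro s; simp [PySem.List.enumerate_nil, fmtFrom]
  | cons x xs ih =>
    intro s
    rw [PySem.List.enumerate_cons]
    have : (s : Int) + 1 = ((s + 1 : Nat) : Int) := by push_cast; ring
    rw [List.map_cons, this, ih (s + 1)]
    simp [fmtFrom, cellOut]

theorem rowsFrom_eq_enum (formats : List (List Int × List String)) (fm : Bool) :
    ∀ (data : List (List String)) (s : Int),
    (PySem.List.enumerate data s).map (fun p => pafB_row formats fm p.1 p.2) =
      rowsFrom formats fm s data := by
  intro data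
  induction data with
  | nil => intro s; simp [PySem.List.enumerate_nil, rowsFrom]
  | cons row rest ih =>
    intro s
    rw [PySem.List.enumerate_cons, List.map_cons, ih (s + 1)]
    have : pafB_row formats fm s row = fmtFrom formats fm s 0 row := by
      have := fmtFrom_eq_enum formats fm s row 0
      simpa [pafB_row] using this
    simp [rowsFrom, this]

-- ===== VERDICT (by name: the statement is the Claim_ definition above) =====
theorem parse_and_format_spec : Claim_equal_parse_and_format := by
  intro data formats formatting _
  unfold Spec_parse_and_format parse_and_format parse_and_format_alt
  rw [outer_eq formats formatting data 0 [] []]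
  have : (PySem.List.enumerate data (0 : Int)).map (fun p => pafB_row formats formatting p.1 p.2) =
      rowsFrom formats formatting 0 data := rowsFrom_eq_enum formats formatting data 0
  simp [this]
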